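-- pv_equiv track=rewrite | github.com/camimilli/DI-Bootcamp | Week2/Day2/DailyChallenge/DailyChallenge.py | process_columns
-- ===== SOURCE A (Python) =====
-- def process_columns(two_dim_list)->str:
--     '''
--     Reads a 2D list column by column
--     from top to bottom
--     returns the elements iterated in a string
--     '''
--     column_counter = 0
--     result = ''
--
--     while column_counter != 3:
--         for row_index, row in enumerate(two_dim_list):
--             for col_index in range(len(row)):
--                 if col_index == column_counter:
--                     result += two_dim_list[row_index][column_counter]
--         column_counter += 1
--
--     return result
-- ===== SOURCE B (Python) =====
-- def process_columns(two_dim_list) -> str: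
--     '''
--     Reads a 2D list column by column
--     from top to bottom
--     returns the elements iterated in a string
--     '''
--     b0 = b1 = b2 = ''
--     for row in two_dim_list:
--         n = len(row)
--         if n > 0:
--             b0 += row[0]
--         if n > 1:
--             b1 += row[1]
--         if n > 2:
--             b2 += row[2]
--     return b0 + b1 + b2
-- ===== Notes on version B (the rewrite author's own statement) =====
-- stated objective: faster
-- what changed: One row-major pass maintaining three column accumulators replaces A's three column-major passes, each of which rescans every row and runs an inner index loop over the whole row just to find one matching column.
import Mathlib
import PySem

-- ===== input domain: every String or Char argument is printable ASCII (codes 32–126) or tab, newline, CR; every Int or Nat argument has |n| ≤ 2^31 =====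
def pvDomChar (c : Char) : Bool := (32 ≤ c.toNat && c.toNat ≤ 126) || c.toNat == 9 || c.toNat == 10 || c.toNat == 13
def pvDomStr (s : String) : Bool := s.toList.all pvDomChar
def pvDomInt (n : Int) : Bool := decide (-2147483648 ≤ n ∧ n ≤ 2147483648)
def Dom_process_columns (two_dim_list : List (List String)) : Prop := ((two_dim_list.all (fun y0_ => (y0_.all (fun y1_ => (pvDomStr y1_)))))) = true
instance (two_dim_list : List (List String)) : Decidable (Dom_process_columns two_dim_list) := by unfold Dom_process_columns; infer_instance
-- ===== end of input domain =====

-- B replaces A's three column-major passes (each rescanning every row with an inner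
-- index loop) by one row-major pass with three string accumulators; objective: faster.

-- ===== PORT A =====
-- literal port: while column_counter != 3 → fold over pyRange 0 3 1; enumerate kept;
-- two_dim_list[row_index][column_counter] ported via pyGetD (always in range when reached).
def process_columns (two_dim_list : List (List String)) : String :=
  (PySem.List.pyRange 0 3 1).foldl (fun result column_counter =>
    (PySem.List.enumerate two_dim_list 0).foldl (fun result p =>
      (PySem.List.pyRange 0 (p.2.length : Int) 1).foldl (fun result col_index =>
        if col_index = column_counter then
          result ++ PySem.List.pyGetD (PySem.List.pyGetD two_dim_list p.1 []) column_counter ""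
        else result) result) result) ""

-- ===== PORT B =====
def process_columns_alt (two_dim_list : List (List String)) : String :=
  let t := two_dim_list.foldl (fun (b : String × String × String) row =>
    let b0 := if row.length > 0 then b.1 ++ row.getD 0 "" else b.1
    let b1 := if row.length > 1 then b.2.1 ++ row.getD 1 "" else b.2.1
    let b2 := if row.length > 2 then b.2.2 ++ row.getD 2 "" else b.2.2
    (b0, b1, b2)) ("", "", "")
  t.1 ++ t.2.1 ++ t.2.2

-- ===== PRECONDITION & SPEC =====
def Spec_process_columns (two_dim_list : List (List String)) (out : String) : Prop := out = process_columns_alt two_dim_list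
instance (two_dim_list : List (List String)) (out : String) : Decidable (Spec_process_columns two_dim_list out) := by unfold Spec_process_columns; infer_instance

-- ===== CLAIM (what is proved, stated in full; the proofs are below) =====
def Claim_equal_process_columns : Prop := ∀ (two_dim_list : List (List String)), Dom_process_columns two_dim_list → Spec_process_columns two_dim_list (process_columns two_dim_list)

-- ===== LEMMAS AND PROOFS =====

-- the per-column step both programs effectively perform on one row
def pvColStep (c : Nat) (s : String) (row : List String) : String :=
  if c < row.length then s ++ row.getD c "" else s

-- A's innermost loop over range(len(row)) appends row's column-c cell at most once
theorem pv_inner (n : Nat) (c : Int) (x s : String) :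
    (PySem.List.pyRange 0 (n : Int) 1).foldl
      (fun r ci => if ci = c then r ++ x else r) s
    = if 0 ≤ c ∧ c < (n : Int) then s ++ x else s := by
  induction n with
  | zero => simp [PySem.List.pyRange_one_eq_nil]
  | succ n ih =>
    have h : ((n + 1 : Nat) : Int) = (n : Int) + 1 := by push_cast; ring
    rw [h, PySem.List.pyRange_one_succ_right (by positivity), List.foldl_append, ih]
    simp only [List.foldl_cons, List.foldl_nil]
    by_cases hc : (n : Int) = c
    · subst hc; simp
    · by_cases hlt : 0 ≤ c ∧ c < (n : Int)
      · have h2 : 0 ≤ c ∧ c < (n : Int) + 1 := by omega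
        simp [hc, hlt, h2]
      · simp [hc, hlt]
        intro h4 h5
        exact False.elim (by omega)

-- A's middle loop (enumerate + self-indexing) is a plain fold of pvColStep over the rows
theorem pv_middle (L : List (List String)) (c : Int) (hc : 0 ≤ c) (s : String) :
    (PySem.List.enumerate L 0).foldl (fun r p =>
      (PySem.List.pyRange 0 (p.2.length : Int) 1).foldl (fun r ci =>
        if ci = c then
          r ++ PySem.List.pyGetD (PySem.List.pyGetD L p.1 []) c ""
        else r) r) s
    = L.foldl (pvColStep c.toNat) s := by
  rw [PySem.List.enumerate_eq_map_pyRange (xs := L) ([] : List String), List.foldl_map]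
  rw [PySem.List.foldl_pyRange_zero_pyGetD L ([] : List String)
      (fun r row =>
        (PySem.List.pyRange 0 (row.length : Int) 1).foldl (fun r ci =>
          if ci = c then r ++ PySem.List.pyGetD row c "" else r) r) s]
  apply PySem.List.foldl_congr_mem
  intro r row _
  rw [pv_inner row.length c (PySem.List.pyGetD row c "") r]
  unfold pvColStep
  by_cases h : c < (row.length : Int)
  · have hlt : c.toNat < row.length := by omega
    rw [if_pos ⟨hc, h⟩, if_pos hlt]
    rw [show c = ((c.toNat : Nat) : Int) by omega, PySem.List.pyGetD_natCast]
    simp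
    rw [show max c 0 = c by omega]
  · have hlt : ¬ c.toNat < row.length := by omega
    simp [h, hlt, hc]

-- shifting the initial accumulator out of a pvColStep fold
theorem pv_shift (L : List (List String)) (c : Nat) (s : String) :
    L.foldl (pvColStep c) s = s ++ L.foldl (pvColStep c) "" := by
  induction L generalizing s with
  | nil => simp
  | cons row L ih =>
    simp only [List.foldl_cons]
    rw [ih, ih (pvColStep c "" row)]
    unfold pvColStep
    split_ifs <;> simp [String.append_assoc]

-- B's single fold over rows computes the three column folds componentwise
theorem pv_triple (L : List (List String)) (x y z : String) :
    L.foldl (fun (b : String × String × String) row =>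
      let b0 := if row.length > 0 then b.1 ++ row.getD 0 "" else b.1
      let b1 := if row.length > 1 then b.2.1 ++ row.getD 1 "" else b.2.1
      let b2 := if row.length > 2 then b.2.2 ++ row.getD 2 "" else b.2.2
      (b0, b1, b2)) (x, y, z)
    = (L.foldl (pvColStep 0) x, L.foldl (pvColStep 1) y, L.foldl (pvColStep 2) z) := by
  induction L generalizing x y z with
  | nil => simp
  | cons row L ih => simp only [List.foldl_cons]; rw [ih]; rfl

-- ===== VERDICT (by name: the statement is the Claim_ definition above) =====
theorem process_columns_spec : Claim_equal_process_columns := by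
  intro L _
  unfold Spec_process_columns process_columns process_columns_alt
  have h3 : PySem.List.pyRange 0 3 1 = [0, 1, 2] := by decide
  rw [h3]
  simp only [List.foldl_cons, List.foldl_nil]
  rw [pv_middle L 0 (by norm_num), pv_shift,
      pv_middle L 1 (by norm_num), pv_shift,
      pv_middle L 2 (by norm_num), pv_shift]
  rw [show ((0 : Int)).toNat = 0 from rfl, show ((1 : Int)).toNat = 1 from rfl,
      show ((2 : Int)).toNat = 2 from rfl]
  rw [pv_triple L "" "" ""]
  simp [String.append_assoc]
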